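-- pv_equiv track=rewrite | github.com/aahmed954/AgenticDosNode | src/cost_optimization/model_optimizer.py | _detect_domain_specific
-- ===== SOURCE A (Python) =====
-- def _detect_domain_specific(text: str) -> bool:
--     """Detect if task is domain-specific."""
--     domain_keywords = [
--         "medical", "legal", "financial", "scientific", "technical",
--         "academic", "research", "clinical", "pharmaceutical", "engineering",
--         "mathematical", "statistical", "biochemical", "legal case"
--     ]
--
--     text_lower = text.lower()
--     return any(keyword in text_lower for keyword in domain_keywords)
-- ===== SOURCE B (Python) =====
-- def _detect_domain_specific(text: str) -> bool:
--     """Detect if task is domain-specific: single left-to-right scan over positions,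
--     testing every keyword as a prefix at each position (instead of 14 independent
--     substring scans)."""
--     keywords = (
--         "medical", "legal", "financial", "scientific", "technical",
--         "academic", "research", "clinical", "pharmaceutical", "engineering",
--         "mathematical", "statistical", "biochemical", "legal case"
--     )
--     t = text.lower()
--     for i in range(len(t)):
--         for kw in keywords:
--             if t.startswith(kw, i):
--                 return True
--     return False
-- ===== Notes on version B (the rewrite author's own statement) =====
-- stated objective: alternative
-- what changed: Replaces the 14 independent substring-membership scans (one per keyword) by one left-to-right scan over the lowercased text positions, testing each keyword as a prefix at the current position.
import Mathlib
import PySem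

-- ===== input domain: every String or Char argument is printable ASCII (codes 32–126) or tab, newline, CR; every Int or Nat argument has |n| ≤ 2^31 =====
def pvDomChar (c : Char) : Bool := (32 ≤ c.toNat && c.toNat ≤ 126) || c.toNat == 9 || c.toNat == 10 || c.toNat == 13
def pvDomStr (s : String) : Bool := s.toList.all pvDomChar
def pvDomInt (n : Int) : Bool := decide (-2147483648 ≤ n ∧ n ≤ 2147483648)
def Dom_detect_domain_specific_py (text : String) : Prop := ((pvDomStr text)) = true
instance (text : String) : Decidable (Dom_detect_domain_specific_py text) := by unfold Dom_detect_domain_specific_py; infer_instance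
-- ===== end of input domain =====

-- B replaces 14 independent substring scans by one scan over positions testing each keyword as a prefix (alternative; same complexity).

-- ===== PORT A =====
def pvKeywordsA : List String :=
  ["medical", "legal", "financial", "scientific", "technical",
   "academic", "research", "clinical", "pharmaceutical", "engineering",
   "mathematical", "statistical", "biochemical", "legal case"]

def detect_domain_specific_py (text : String) : Bool :=
  let text_lower := PySem.Str.lower text
  pvKeywordsA.any (fun keyword => PySem.Str.isIn keyword text_lower)

-- ===== PORT B =====
def pvKeywordsB : List (List Char) :=
  ["medical".toList, "legal".toList, "financial".toList, "scientific".toList, "technical".toList,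
   "academic".toList, "research".toList, "clinical".toList, "pharmaceutical".toList, "engineering".toList,
   "mathematical".toList, "statistical".toList, "biochemical".toList, "legal case".toList]

-- the position loop: at each position (suffix) test every keyword as a prefix; advance one char
def pvScan (kws : List (List Char)) : List Char → Bool
  | [] => false
  | c :: rest =>
      if kws.any (fun kw => kw.isPrefixOf (c :: rest)) then true
      else pvScan kws rest

def detect_domain_specific_py_alt (text : String) : Bool :=
  pvScan pvKeywordsB (PySem.Chars.lower text.toList)

-- ===== PRECONDITION & SPEC =====
def Spec_detect_domain_specific_py (text : String) (out : Bool) : Prop := out = detect_domain_specific_py_alt text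
instance (text : String) (out : Bool) : Decidable (Spec_detect_domain_specific_py text out) := by unfold Spec_detect_domain_specific_py; infer_instance

-- ===== CLAIM (what is proved, stated in full; the proofs are below) =====
def Claim_equal_detect_domain_specific_py : Prop := ∀ (text : String), Dom_detect_domain_specific_py text → Spec_detect_domain_specific_py text (detect_domain_specific_py text)

-- ===== LEMMAS AND PROOFS =====

-- the position scan finds exactly the keywords occurring as an infix (keywords are nonempty)
lemma pvScan_eq_true_iff (kws : List (List Char)) (h : ∀ kw ∈ kws, kw ≠ []) :
    ∀ t : List Char, pvScan kws t = true ↔ ∃ kw ∈ kws, kw <:+: t := by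
  intro t
  induction t with
  | nil =>
      constructor
      · intro hs; simp [pvScan] at hs
      · rintro ⟨kw, hkw, hinf⟩
        exact absurd (List.eq_nil_of_infix_nil hinf) (h kw hkw)
  | cons c rest ih =>
      simp only [pvScan]
      split_ifs with hpre
      · simp only [true_iff]
        rw [List.any_eq_true] at hpre
        obtain ⟨kw, hkw, hp⟩ := hpre
        exact ⟨kw, hkw, (List.isPrefixOf_iff_prefix.mp hp).isInfix⟩
      · rw [ih]
        constructor
        · rintro ⟨kw, hkw, hinf⟩
          exact ⟨kw, hkw, hinf.trans (List.suffix_cons c rest).isInfix⟩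
        · rintro ⟨kw, hkw, hinf⟩
          rcases List.infix_cons_iff.mp hinf with hp | hi
          · exact absurd (List.any_eq_true.mpr ⟨kw, hkw, by
              exact List.isPrefixOf_iff_prefix.mpr hp⟩) hpre
          · exact ⟨kw, hkw, hi⟩

-- ===== VERDICT (by name: the statement is the Claim_ definition above) =====
theorem detect_domain_specific_py_spec : Claim_equal_detect_domain_specific_py := by
  intro text _
  unfold Spec_detect_domain_specific_py detect_domain_specific_py detect_domain_specific_py_alt
  rw [Bool.eq_iff_iff]
  rw [pvScan_eq_true_iff pvKeywordsB (by decide)]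
  have hmap : pvKeywordsB = pvKeywordsA.map String.toList := rfl
  rw [hmap]
  simp only [List.any_eq_true, PySem.Str.isIn_eq, PySem.Chars.isIn_iff_infix,
    PySem.Str.toList_lower, List.mem_map]
  constructor
  · rintro ⟨kw, hkw, hi⟩
    exact ⟨kw.toList, ⟨kw, hkw, rfl⟩, hi⟩
  · rintro ⟨kw, ⟨a, ha, rfl⟩, hi⟩
    exact ⟨a, ha, hi⟩
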